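-- pv_equiv track=rewrite | github.com/grupo-medway/omr-checker | api/services/audit_registry.py | _is_problematic_value
-- ===== SOURCE A (Python) =====
-- PROBLEM_VALUES = {
--     "",
--     "UNMARKED",
--     "INVALID",
--     "MULTI",
--     "MULTIPLE",
--     "?",
--     "NA",
--     "BLANK",
--     "EMPTY",
-- }
--
-- VALID_ALTERNATIVES = {"A", "B", "C", "D", "E"}
--
-- def _is_problematic_value(value: str) -> bool:
--     if value in PROBLEM_VALUES:
--         return True
--
--     normalized = value.strip().upper()
--     if not normalized:
--         return True
--
--     if normalized in PROBLEM_VALUES: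
--         return True
--
--     letters = [char for char in normalized if char.isalpha()]
--     if not letters:
--         return True
--
--     unique_letters = {char for char in letters}
--
--     if len(unique_letters) > 1:
--         return True
--
--     only_letter = unique_letters.pop()
--     return only_letter not in VALID_ALTERNATIVES or normalized != only_letter
-- ===== SOURCE B (Python) =====
-- PROBLEM_VALUES = {
--     "",
--     "UNMARKED",
--     "INVALID",
--     "MULTI",
--     "MULTIPLE",
--     "?",
--     "NA",
--     "BLANK",
--     "EMPTY",
-- }
--
-- VALID_ALTERNATIVES = {"A", "B", "C", "D", "E"}
--
--
-- def _is_problematic_value(value: str) -> bool: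
--     # A value is fine exactly when it normalizes to one valid letter.
--     return value.strip().upper() not in VALID_ALTERNATIVES
-- ===== Notes on version B (the rewrite author's own statement) =====
-- stated objective: simpler
-- what changed: Replaced the multi-branch casework (problem-set checks, per-character alpha scan, unique-letter set construction, final comparison) with a single closed-form membership test: a value is problematic iff its strip().upper() normalization is not one of the five valid letters; constant-factor faster since the per-character scan and set building disappear.
import Mathlib
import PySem

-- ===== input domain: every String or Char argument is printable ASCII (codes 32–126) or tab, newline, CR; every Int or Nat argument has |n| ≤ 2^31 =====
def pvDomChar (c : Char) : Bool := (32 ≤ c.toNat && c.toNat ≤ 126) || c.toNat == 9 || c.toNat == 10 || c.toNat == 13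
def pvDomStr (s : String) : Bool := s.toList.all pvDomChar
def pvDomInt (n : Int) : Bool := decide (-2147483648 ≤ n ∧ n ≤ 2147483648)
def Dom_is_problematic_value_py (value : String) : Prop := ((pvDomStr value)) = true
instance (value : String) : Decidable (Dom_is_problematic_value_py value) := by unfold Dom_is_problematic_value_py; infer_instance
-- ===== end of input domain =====

-- B replaces A's casework by a single membership test: a value is non-problematic iff
-- its strip().upper() normalization is one of the five valid letters (objective: simpler).

-- ===== PORT A =====
-- PROBLEM_VALUES and VALID_ALTERNATIVES as lists of distinct char-lists (Python strings).
def pvProblemValues : List (List Char) :=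
  [[], ['U','N','M','A','R','K','E','D'], ['I','N','V','A','L','I','D'],
   ['M','U','L','T','I'], ['M','U','L','T','I','P','L','E'], ['?'],
   ['N','A'], ['B','L','A','N','K'], ['E','M','P','T','Y']]

def pvValidAlternatives : List (List Char) := [['A'], ['B'], ['C'], ['D'], ['E']]

def is_problematic_value_py (value : String) : Bool :=
  if pvProblemValues.contains value.toList then true
  else
    let normalized := PySem.Chars.upper (PySem.Chars.strip value.toList)
    if normalized.isEmpty then true
    else if pvProblemValues.contains normalized then true
    else
      let letters := normalized.filter (fun c => PySem.Chars.isalpha c)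
      if letters.isEmpty then true
      else
        let uniqueLetters : PySem.Set Char := PySem.Set.ofList letters
        if uniqueLetters.length > 1 then true
        else
          -- unique_letters.pop() on a singleton set: its only element
          let onlyLetter := uniqueLetters.headD ' '
          !(pvValidAlternatives.contains [onlyLetter]) || normalized ≠ [onlyLetter]

-- ===== PORT B =====
def is_problematic_value_py_alt (value : String) : Bool :=
  !(pvValidAlternatives.contains (PySem.Chars.upper (PySem.Chars.strip value.toList)))

-- ===== PRECONDITION & SPEC =====
def Spec_is_problematic_value_py (value : String) (out : Bool) : Prop := out = is_problematic_value_py_alt value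
instance (value : String) (out : Bool) : Decidable (Spec_is_problematic_value_py value out) := by unfold Spec_is_problematic_value_py; infer_instance

-- ===== CLAIM (what is proved, stated in full; the proofs are below) =====
def Claim_equal_is_problematic_value_py : Prop := ∀ (value : String), Dom_is_problematic_value_py value → Spec_is_problematic_value_py value (is_problematic_value_py value)

-- ===== LEMMAS AND PROOFS =====

-- Every PROBLEM_VALUES entry normalizes to something outside VALID_ALTERNATIVES.
lemma pvProb_normalizes_invalid (l : List Char) (h : l ∈ pvProblemValues) :
    PySem.Chars.upper (PySem.Chars.strip l) ∉ pvValidAlternatives := by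
  simp only [pvProblemValues, List.mem_cons, List.not_mem_nil, or_false] at h
  rcases h with h|h|h|h|h|h|h|h|h <;> subst h <;> decide

-- ===== VERDICT (by name: the statement is the Claim_ definition above) =====
theorem is_problematic_value_py_spec : Claim_equal_is_problematic_value_py := by
  intro value _
  unfold Spec_is_problematic_value_py is_problematic_value_py_alt
  by_cases hv : PySem.Chars.upper (PySem.Chars.strip value.toList) ∈ pvValidAlternatives
  · -- normalized is one valid letter: A returns false, B returns false
    have hnp : value.toList ∉ pvProblemValues := fun h =>
      pvProb_normalizes_invalid value.toList h hv
    have hv' := hv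
    simp only [pvValidAlternatives, List.mem_cons, List.not_mem_nil, or_false] at hv'
    rcases hv' with h|h|h|h|h <;> simp [is_problematic_value_py, h, hnp] <;> decide
  · -- normalized not a valid letter: B returns true; show A returns true
    have hb : pvValidAlternatives.contains
        (PySem.Chars.upper (PySem.Chars.strip value.toList)) = false := by
      simpa using hv
    simp only [is_problematic_value_py, hb, Bool.not_false]
    split_ifs with h1 h2 h3 h4 h5 <;> try rfl
    -- final branch: returns true since normalized ≠ the valid single letter
    set n := PySem.Chars.upper (PySem.Chars.strip value.toList) with hn
    set L := (PySem.Set.ofList (n.filter (fun c => PySem.Chars.isalpha c))).headD ' ' with hL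
    by_cases he : n = [L]
    · have hm : [L] ∉ pvValidAlternatives := by rw [he] at hb; simpa using hb
      simp [hm]
    · simp [he]
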